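-- pv_equiv track=rewrite | github.com/ptitpoulpe/aoc-2024 | code/02.py | part1
-- ===== SOURCE A (Python) =====
-- def part1(lines):
--     safe_reports = 0
--     for line in lines:
--         diffs = [
--             r - l
--             for r, l in zip(line[:-1], line[1:])
--         ]
--         if (all(0 < diff and diff <= 3 for diff in diffs) or
--             all(-3 <= diff and diff < 0 for diff in diffs)):
--             safe_reports += 1
--     return safe_reports
-- ===== SOURCE B (Python) =====
-- def part1(lines):
--     safe = 0
--     for line in lines:
--         l = list(line)
--         gaps_ok = all(1 <= abs(a - b) <= 3 for a, b in zip(l, l[1:]))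
--         monotonic = l == sorted(l) or l == sorted(l, reverse=True)
--         if gaps_ok and monotonic:
--             safe += 1
--     return safe
-- ===== Notes on version B (the rewrite author's own statement) =====
-- stated objective: idiomatic
-- what changed: Replaces A's two sign-of-difference scans over an explicit diffs list with an absolute-gap check plus a sort-based monotonicity test (line == sorted(line) or its reverse).
import Mathlib
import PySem

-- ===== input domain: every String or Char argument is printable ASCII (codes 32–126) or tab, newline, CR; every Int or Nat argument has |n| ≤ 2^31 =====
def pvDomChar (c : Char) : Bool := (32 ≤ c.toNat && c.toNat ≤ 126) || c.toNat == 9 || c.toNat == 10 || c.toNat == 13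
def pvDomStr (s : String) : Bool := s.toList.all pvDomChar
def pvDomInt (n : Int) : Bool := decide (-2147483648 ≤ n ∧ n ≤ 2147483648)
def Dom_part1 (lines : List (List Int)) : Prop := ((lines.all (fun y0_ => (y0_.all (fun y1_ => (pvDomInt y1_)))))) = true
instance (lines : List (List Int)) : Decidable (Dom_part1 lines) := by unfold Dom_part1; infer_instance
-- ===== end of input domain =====

-- B replaces A's sign-of-difference scans with an absolute-gap check plus a sort-based
-- monotonicity test (idiomatic; return value only, no mutation).

-- ===== PORT A =====
def part1 (lines : List (List Int)) : Int :=
  lines.foldl (fun safe_reports line =>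
    let diffs :=
      (List.zip (PySem.List.slice line none (some (-1))) (PySem.List.slice line (some 1) none)).map
        (fun p => p.1 - p.2)
    if (diffs.all (fun d => decide (0 < d) && decide (d ≤ 3)) ||
        diffs.all (fun d => decide (-3 ≤ d) && decide (d < 0))) then
      safe_reports + 1
    else safe_reports) 0

-- ===== PORT B =====
def part1_alt (lines : List (List Int)) : Int :=
  lines.foldl (fun safe line =>
    let gaps_ok :=
      (List.zip line (PySem.List.slice line (some 1) none)).all
        (fun p => decide (1 ≤ (p.1 - p.2).natAbs) && decide ((p.1 - p.2).natAbs ≤ 3))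
    let monotonic :=
      decide (line = PySem.List.sorted line (fun x => x) false) ||
      decide (line = PySem.List.sorted line (fun x => x) true)
    if gaps_ok && monotonic then safe + 1 else safe) 0

-- ===== PRECONDITION & SPEC =====
def Spec_part1 (lines : List (List Int)) (out : Int) : Prop := out = part1_alt lines
instance (lines : List (List Int)) (out : Int) : Decidable (Spec_part1 lines out) := by unfold Spec_part1; infer_instance

-- ===== CLAIM (what is proved, stated in full; the proofs are below) =====
def Claim_equal_part1 : Prop := ∀ (lines : List (List Int)), Dom_part1 lines → Spec_part1 lines (part1 lines)

-- ===== LEMMAS AND PROOFS =====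

-- l[:-1] zipped with l[1:] is the list of adjacent pairs, the same as zip l l.tail
lemma zip_dropLast_tail (l : List Int) : List.zip l.dropLast l.tail = List.zip l l.tail := by
  cases l with
  | nil => rfl
  | cons a t =>
    induction t generalizing a with
    | nil => rfl
    | cons b t ih => simpa [List.dropLast, List.zip_cons_cons] using ih b

-- adjacent-pairs "all" is IsChain
lemma allZip_iff_chain (p : Int × Int → Bool) (l : List Int) :
    ((List.zip l l.tail).all p = true) ↔ l.IsChain (fun a b => p (a, b) = true) := by
  cases l with
  | nil => simp
  | cons a t =>
    induction t generalizing a with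
    | nil => simp
    | cons b t ih =>
      rw [List.isChain_cons_cons, ← ih b]
      simp [List.zip_cons_cons]

-- line == sorted(line) says the line is adjacent-nondecreasing
lemma sorted_asc_iff (l : List Int) :
    l = PySem.List.sorted l (fun x => x) false ↔
      ((List.zip l l.tail).all (fun q => decide (q.1 ≤ q.2)) = true) := by
  rw [allZip_iff_chain]
  have hiff : l.IsChain (fun a b : Int => (decide (a ≤ b)) = true) ↔ l.IsChain (fun a b : Int => a ≤ b) :=
    List.IsChain.iff (by simp)
  rw [hiff, List.isChain_iff_pairwise]
  constructor
  · intro h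
    rw [h]
    exact PySem.List.sorted_pairwise (xs := l) (key := fun x : Int => x)
  · intro h
    exact (PySem.List.sorted_eq_self_of_pairwise l (fun x : Int => x) h).symm

-- line == sorted(line, reverse=True) says the line is adjacent-nonincreasing
lemma sorted_desc_iff (l : List Int) :
    l = PySem.List.sorted l (fun x => x) true ↔
      ((List.zip l l.tail).all (fun q => decide (q.2 ≤ q.1)) = true) := by
  rw [allZip_iff_chain]
  have hiff : l.IsChain (fun a b : Int => (decide (b ≤ a)) = true) ↔ l.IsChain (fun a b : Int => a ≥ b) :=
    List.IsChain.iff (by simp [ge_iff_le])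
  rw [hiff, List.isChain_iff_pairwise]
  constructor
  · intro h
    rw [h]
    exact PySem.List.sorted_pairwise_rev (xs := l) (key := fun x : Int => x)
  · intro h
    exact (PySem.List.sorted_rev_eq_self_of_pairwise l (fun x : Int => x) h).symm

-- per-line agreement of A's safety test with B's
lemma step_eq_plain (line : List Int) :
    ((((List.zip (PySem.List.slice line none (some (-1))) (PySem.List.slice line (some 1) none)).map
        (fun p => p.1 - p.2)).all (fun d => decide (0 < d) && decide (d ≤ 3)) ||
      ((List.zip (PySem.List.slice line none (some (-1))) (PySem.List.slice line (some 1) none)).map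
        (fun p => p.1 - p.2)).all (fun d => decide (-3 ≤ d) && decide (d < 0)))) =
    (((List.zip line (PySem.List.slice line (some 1) none)).all
        (fun p => decide (1 ≤ (p.1 - p.2).natAbs) && decide ((p.1 - p.2).natAbs ≤ 3))) &&
     (decide (line = PySem.List.sorted line (fun x => x) false) ||
      decide (line = PySem.List.sorted line (fun x => x) true))) := by
  apply Bool.eq_iff_iff.mpr
  rw [PySem.List.slice_to_neg_one, PySem.List.slice_from_one, zip_dropLast_tail]
  simp only [Bool.or_eq_true, Bool.and_eq_true, decide_eq_true_eq, List.all_map,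
    Function.comp_def]
  rw [sorted_asc_iff, sorted_desc_iff]
  simp only [List.all_eq_true, Bool.and_eq_true, decide_eq_true_eq]
  constructor
  · rintro (h | h)
    · exact ⟨fun q hq => by have := h q hq; omega,
        Or.inr (fun q hq => by have := h q hq; omega)⟩
    · exact ⟨fun q hq => by have := h q hq; omega,
        Or.inl (fun q hq => by have := h q hq; omega)⟩
  · rintro ⟨hg, hm | hm⟩
    · exact Or.inr fun q hq => by have := hg q hq; have := hm q hq; omega
    · exact Or.inl fun q hq => by have := hg q hq; have := hm q hq; omega

theorem part1_eq_alt (lines : List (List Int)) : part1 lines = part1_alt lines := by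
  unfold part1 part1_alt
  congr 1
  funext acc line
  show (if (((List.zip (PySem.List.slice line none (some (-1))) (PySem.List.slice line (some 1) none)).map
        (fun p => p.1 - p.2)).all (fun d => decide (0 < d) && decide (d ≤ 3)) ||
      ((List.zip (PySem.List.slice line none (some (-1))) (PySem.List.slice line (some 1) none)).map
        (fun p => p.1 - p.2)).all (fun d => decide (-3 ≤ d) && decide (d < 0))) = true
      then acc + 1 else acc) =
    (if ((((List.zip line (PySem.List.slice line (some 1) none)).all
        (fun p => decide (1 ≤ (p.1 - p.2).natAbs) && decide ((p.1 - p.2).natAbs ≤ 3))) &&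
     (decide (line = PySem.List.sorted line (fun x => x) false) ||
      decide (line = PySem.List.sorted line (fun x => x) true))) = true)
      then acc + 1 else acc)
  rw [step_eq_plain]

-- ===== VERDICT (by name: the statement is the Claim_ definition above) =====
theorem part1_spec : Claim_equal_part1 := by
  intro lines _
  unfold Spec_part1
  exact part1_eq_alt lines
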